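-- pv_equiv track=rewrite | github.com/ChinChainis/ProyectoPDS | funciones.py | comparar2
-- ===== SOURCE A (Python) =====
-- def comparar2(hashes,database):
--     matches_por_canc = {}
--     #recorremos los hashes y vemos las coincidencias y creamos una nueva lista de coincidencias con canciones,
--     #para luego concretar cuál es el mejor matching
--     for hash, (sample_time, _) in hashes.items():
--         if hash in database:
--             matching_occurences = database[hash]
--             for source_time, song_index in matching_occurences:
--                 if song_index not in matches_por_canc:
--                     matches_por_canc[song_index] = []
--                 matches_por_canc[song_index].append((hash, sample_time, source_time))
--
--     #lista de puntuaciones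
--     puntuaciones = {}
--     #puntuación máxima --> nos servirá de umbral
--     #0 -> 5.2%
--     #250 -> 2.5%
--     #300 -> 2.1%
--     #350 -> 2.6%
--     #500 -> 4.7%
--     #1000 ->17.20%
--     punt_max = 300
--     #nombre de la canción ganadora --> lo igualamos a NOT_FOUND por defecto
--     res_cancion = "NOT_FOUND"
--     #song_index es el nombre de la canción
--     for song_index, matches in matches_por_canc.items():
--         puntuaciones_por_offset = {}
--         for hash, sample_time, source_time in matches:
--             #vemos la diferencia de tiempo para escoger las frecuencias que encajen
--             delta = source_time - sample_time
--             if delta not in puntuaciones_por_offset: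
--                 puntuaciones_por_offset[delta] = 0
--             #empezamos a añadir el valor de puntuación
--             puntuaciones_por_offset[delta] += 1
--
--         max = (0, 0)
--         #seleccionamos la puntuación máxima
--         for offset, score in puntuaciones_por_offset.items():
--             if score > max[1]:
--                 max = (offset, score)
--
--         puntuaciones[song_index] = max
--         if (punt_max < max[1]):
--             punt_max = max[1]
--             res_cancion = song_index
--
--     return res_cancion
-- ===== SOURCE B (Python) =====
-- def comparar2(hashes, database):
--     # Flat list of (song, offset) matches; per-song best via dedup+count; winner by
--     # global max and first-argmax instead of a running threshold.
--     pairs = [(song, source_time - sample_time)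
--              for h, (sample_time, _) in hashes.items() if h in database
--              for source_time, song in database[h]]
--     songs = list(dict.fromkeys(song for song, _ in pairs))
--     best = {}
--     for s in songs:
--         deltas = [d for s2, d in pairs if s2 == s]
--         best[s] = max(map(deltas.count, dict.fromkeys(deltas)))
--     m = max(best.values(), default=0)
--     if m <= 300:
--         return "NOT_FOUND"
--     return next(s for s in songs if best[s] == m)
-- ===== Notes on version B (the rewrite author's own statement) =====
-- stated objective: alternative
-- what changed: B flattens all matches into one flat (song, offset) pair list, computes each song's best score by list.count over the deduplicated offsets of that song's sub-list (no counting dicts and no per-song match buffers), and picks the winner by a global maximum plus a first-argmax scan over the songs in first-appearance order instead of A's running strict-threshold update.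
import Mathlib
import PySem

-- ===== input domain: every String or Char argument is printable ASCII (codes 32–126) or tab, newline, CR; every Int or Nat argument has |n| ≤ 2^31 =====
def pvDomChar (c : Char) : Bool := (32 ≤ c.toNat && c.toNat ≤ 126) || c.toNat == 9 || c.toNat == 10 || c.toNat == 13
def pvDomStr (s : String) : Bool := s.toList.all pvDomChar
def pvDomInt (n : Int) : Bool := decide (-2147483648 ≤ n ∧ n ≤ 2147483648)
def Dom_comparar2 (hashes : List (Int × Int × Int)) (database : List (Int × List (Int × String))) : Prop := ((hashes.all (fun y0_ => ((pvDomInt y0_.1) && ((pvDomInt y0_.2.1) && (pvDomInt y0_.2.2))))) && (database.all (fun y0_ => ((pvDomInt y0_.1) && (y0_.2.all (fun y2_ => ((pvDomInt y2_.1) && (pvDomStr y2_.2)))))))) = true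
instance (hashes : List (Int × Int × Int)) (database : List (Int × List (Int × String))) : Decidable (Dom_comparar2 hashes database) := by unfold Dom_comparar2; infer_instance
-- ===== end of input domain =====

-- B replaces A's dict histograms and running strict-threshold scan by a flat (song, offset)
-- pair list with dedup+count per song and a global-max / first-argmax selection (alternative
-- decomposition; same return value).

-- ===== PORT A =====
def comparar2 (hashes : List (Int × Int × Int)) (database : List (Int × List (Int × String))) : String :=
  let hd := PySem.Dict.ofList hashes
  let db := PySem.Dict.ofList database
  -- for hash, (sample_time, _) in hashes.items(): if hash in database: for source_time, song_index in database[hash]: append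
  let grouped := hd.items.foldl
    (fun (m : PySem.Dict String (List (Int × Int × Int))) p =>
      match db.get? p.1 with
      | some occ => occ.foldl (fun m o => m.modify o.2 [] (fun l => l ++ [(p.1, p.2.1, o.1)])) m
      | none => m)
    PySem.Dict.empty
  -- state = ((punt_max, res_cancion), puntuaciones)
  let fin := grouped.items.foldl
    (fun (st : (Int × String) × PySem.Dict String (Int × Int)) kv =>
      let ppo : PySem.Dict Int Int :=
        kv.2.foldl (fun d t => d.modify (t.2.2 - t.2.1) 0 (· + 1)) PySem.Dict.empty
      let mx : Int × Int := ppo.items.foldl (fun mx os => if os.2 > mx.2 then os else mx) (0, 0)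
      let punts := st.2.insert kv.1 mx
      if st.1.1 < mx.2 then ((mx.2, kv.1), punts) else (st.1, punts))
    ((300, "NOT_FOUND"), PySem.Dict.empty)
  fin.1.2

-- ===== PORT B =====
def comparar2_alt (hashes : List (Int × Int × Int)) (database : List (Int × List (Int × String))) : String :=
  let hd := PySem.Dict.ofList hashes
  let db := PySem.Dict.ofList database
  -- pairs = [(song, source - sample) for h, (sample, _) in hashes.items() if h in database for source, song in database[h]]
  let pairs : List (String × Int) := hd.items.flatMap (fun p =>
    match db.get? p.1 with
    | some occ => occ.map (fun o => (o.2, o.1 - p.2.1))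
    | none => [])
  -- songs = list(dict.fromkeys(song for song, _ in pairs))
  let songs : List String := PySem.List.dedup (pairs.map (fun q => q.1))
  -- best[s] = max(map(deltas.count, dict.fromkeys(deltas)))  (max() of a nonempty generator: s ∈ songs)
  let best : PySem.Dict String Int := songs.foldl
    (fun d s =>
      let deltas := (pairs.filter (fun q => q.1 == s)).map (fun q => q.2)
      d.insert s ((PySem.List.max? ((PySem.List.dedup deltas).map
        (fun dl => (deltas.count dl : Int))) (fun y => y)).getD 0))
    PySem.Dict.empty
  -- m = max(best.values(), default=0)
  let m : Int := (PySem.List.max? best.values (fun y => y)).getD 0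
  if m ≤ 300 then "NOT_FOUND"
  -- next(s for s in songs if best[s] == m): always found when m > 300
  else (songs.find? (fun s => best.getD s 0 == m)).getD "NOT_FOUND"

-- ===== PRECONDITION & SPEC =====
def Spec_comparar2 (hashes : List (Int × Int × Int)) (database : List (Int × List (Int × String))) (out : String) : Prop := out = comparar2_alt hashes database
instance (hashes : List (Int × Int × Int)) (database : List (Int × List (Int × String))) (out : String) : Decidable (Spec_comparar2 hashes database out) := by unfold Spec_comparar2; infer_instance

-- ===== CLAIM (what is proved, stated in full; the proofs are below) =====
def Claim_equal_comparar2 : Prop := ∀ (hashes : List (Int × Int × Int)) (database : List (Int × List (Int × String))), Dom_comparar2 hashes database → Spec_comparar2 hashes database (comparar2 hashes database)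

-- ===== LEMMAS AND PROOFS =====

-- the flat event list both programs traverse: (song, (hash, sample, source)) per matching occurrence
def pvE (hashes : List (Int × Int × Int)) (database : List (Int × List (Int × String))) :
    List (String × (Int × Int × Int)) :=
  (PySem.Dict.ofList hashes).items.flatMap (fun p =>
    match (PySem.Dict.ofList database).get? p.1 with
    | some occ => occ.map (fun o => (o.2, (p.1, p.2.1, o.1)))
    | none => [])

-- A's two-level grouping loop is the flat fold over pvE
lemma pvA_group_aux {db : PySem.Dict Int (List (Int × String))}
    (l : List (Int × Int × Int)) (m : PySem.Dict String (List (Int × Int × Int))) :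
    l.foldl
      (fun (m : PySem.Dict String (List (Int × Int × Int))) p =>
        match db.get? p.1 with
        | some occ => occ.foldl (fun m o => m.modify o.2 [] (fun l => l ++ [(p.1, p.2.1, o.1)])) m
        | none => m)
      m
    = (l.flatMap (fun p =>
        match db.get? p.1 with
        | some occ => occ.map (fun o => (o.2, (p.1, p.2.1, o.1)))
        | none => [])).foldl (fun m q => m.modify q.1 [] (fun l => l ++ [q.2])) m := by
  induction l generalizing m with
  | nil => rfl
  | cons p t ih =>
      simp only [List.foldl_cons, List.flatMap_cons, List.foldl_append]
      cases h : db.get? p.1 with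
      | none => exact ih m
      | some occ =>
          simp only [List.foldl_map]
          exact ih _

lemma pvA_group (hashes : List (Int × Int × Int)) (database : List (Int × List (Int × String))) :
    (PySem.Dict.ofList hashes).items.foldl
      (fun (m : PySem.Dict String (List (Int × Int × Int))) p =>
        match (PySem.Dict.ofList database).get? p.1 with
        | some occ => occ.foldl (fun m o => m.modify o.2 [] (fun l => l ++ [(p.1, p.2.1, o.1)])) m
        | none => m)
      PySem.Dict.empty
    = (pvE hashes database).foldl (fun m q => m.modify q.1 [] (fun l => l ++ [q.2]))
        PySem.Dict.empty :=
  pvA_group_aux _ _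

-- B's flat pair list is pvE projected to (song, delta)
lemma pvB_pairs (hashes : List (Int × Int × Int)) (database : List (Int × List (Int × String))) :
    ((PySem.Dict.ofList hashes).items.flatMap (fun p =>
      match (PySem.Dict.ofList database).get? p.1 with
      | some occ => occ.map (fun o => (o.2, o.1 - p.2.1))
      | none => ([] : List (String × Int))))
    = (pvE hashes database).map (fun q => (q.1, q.2.2.2 - q.2.2.1)) := by
  unfold pvE
  rw [List.map_flatMap]
  refine List.flatMap_congr (fun p _ => ?_)
  cases h : (PySem.Dict.ofList database).get? p.1 with
  | none => simp
  | some occ => simp [List.map_map, Function.comp]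

-- running strict max over a value function: the pair version computed in closed form
def pvM (v : String → Int) (ss : List String) (a : Int) : Int :=
  ss.foldl (fun x s => max x (v s)) a

lemma pvM_nil (v : String → Int) (a : Int) : pvM v [] a = a := rfl

lemma pvM_cons (v : String → Int) (s : String) (t : List String) (a : Int) :
    pvM v (s :: t) a = pvM v t (max a (v s)) := rfl

lemma pvM_le (v : String → Int) (ss : List String) (a : Int) : a ≤ pvM v ss a :=
  (PySem.List.le_foldl_max_int ss v a).1

lemma pvM_attain (v : String → Int) (ss : List String) (a : Int) (h : a < pvM v ss a) :
    ∃ x ∈ ss, v x = pvM v ss a := by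
  induction ss generalizing a with
  | nil => rw [pvM_nil] at h; exact absurd h (lt_irrefl a)
  | cons s t ih =>
      rw [pvM_cons] at h ⊢
      by_cases hlt : max a (v s) < pvM v t (max a (v s))
      · obtain ⟨x, hx, hvx⟩ := ih (max a (v s)) hlt
        exact ⟨x, List.mem_cons_of_mem _ hx, hvx⟩
      · have heq : pvM v t (max a (v s)) = max a (v s) :=
          le_antisymm (not_lt.mp hlt) (pvM_le v t _)
        rw [heq] at h ⊢
        exact ⟨s, List.mem_cons_self, by omega⟩

-- the running strict-threshold scan, in closed form: final max, and first argmax if it beats a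
lemma pvSel (v : String → Int) (ss : List String) (a : Int) (r : String) :
    ss.foldl (fun (st : Int × String) s => if st.1 < v s then (v s, s) else st) (a, r)
      = (pvM v ss a,
         if pvM v ss a ≤ a then r
         else ((ss.find? (fun s => v s == pvM v ss a)).getD r)) := by
  induction ss generalizing a r with
  | nil => simp [pvM_nil]
  | cons s t ih =>
      rw [List.foldl_cons, pvM_cons]
      by_cases h : a < v s
      · rw [if_pos h, ih]
        have hmax : max a (v s) = v s := max_eq_right h.le
        rw [hmax]
        have hle := pvM_le v t (v s)
        by_cases h2 : pvM v t (v s) ≤ v s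
        · have heq : pvM v t (v s) = v s := le_antisymm h2 hle
          rw [heq, if_pos le_rfl, if_neg (by omega),
            List.find?_cons_of_pos (by simp)]
          rfl
        · rw [if_neg h2, if_neg (by omega),
            List.find?_cons_of_neg (by simp; omega)]
          obtain ⟨x, hx, hvx⟩ := pvM_attain v t (v s) (lt_of_not_ge h2)
          have hsome : (t.find? (fun s' => v s' == pvM v t (v s))).isSome :=
            List.find?_isSome.mpr ⟨x, hx, by simp [hvx]⟩
          obtain ⟨y, hy⟩ := Option.isSome_iff_exists.mp hsome
          rw [hy]
          rfl
      · rw [if_neg h, ih]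
        have hmax : max a (v s) = a := max_eq_left (not_lt.mp h)
        rw [hmax]
        by_cases h2 : pvM v t a ≤ a
        · rw [if_pos h2, if_pos h2]
        · rw [if_neg h2, if_neg h2,
            List.find?_cons_of_neg (by simp; have := pvM_le v t a; omega)]


lemma pvM_max_comm (v : String → Int) (t : List String) (a b : Int) :
    pvM v t (max a b) = max a (pvM v t b) := by
  induction t generalizing b with
  | nil => simp [pvM_nil]
  | cons s t ih =>
      rw [pvM_cons, pvM_cons, max_assoc, ih]

-- my find?_congr on members: predicates that agree on the list's elements find the same thing
lemma pv_find_congr {p q : String → Bool} (l : List String)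
    (h : ∀ x ∈ l, p x = q x) : l.find? p = l.find? q := by
  induction l with
  | nil => rfl
  | cons x t ih =>
      have hx := h x List.mem_cons_self
      by_cases hp : p x = true
      · rw [List.find?_cons_of_pos hp, List.find?_cons_of_pos (hx ▸ hp)]
      · rw [List.find?_cons_of_neg (by simpa using hp),
          List.find?_cons_of_neg (by rw [← hx]; simpa using hp)]
        exact ih (fun x hm => h x (List.mem_cons_of_mem _ hm))

-- A's argmax pair fold, projected to the score component, is a running max of the scores
lemma pv_max (l : List (Int × Int)) (o0 b : Int) :
    (l.foldl (fun mx os => if os.2 > mx.2 then os else mx) (o0, b)).2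
      = (l.map (fun x => x.2)).foldl (fun b s => if s > b then s else b) b := by
  induction l generalizing o0 b with
  | nil => rfl
  | cons x t ih =>
      simp only [List.foldl_cons, List.map_cons]
      by_cases h : x.2 > b <;> simp [h, ih]

-- A's per-song score: counter over the offsets, then argmax
def pvAv (ms : List (Int × Int × Int)) : Int :=
  ((ms.foldl (fun d t => d.modify (t.2.2 - t.2.1) 0 (· + 1)) PySem.Dict.empty).items.foldl
    (fun mx os => if os.2 > mx.2 then os else mx) ((0, 0) : Int × Int)).2

-- B's per-song score: max of counts over the deduplicated offsets
def pvBv (ds : List Int) : Int :=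
  (PySem.List.max? ((PySem.List.dedup ds).map (fun dl => (ds.count dl : Int))) (fun y => y)).getD 0

lemma pvAv_eq_pvBv (ms : List (Int × Int × Int)) (hne : ms ≠ []) :
    pvAv ms = pvBv (ms.map (fun t => t.2.2 - t.2.1)) := by
  unfold pvAv pvBv
  have hctr : ms.foldl (fun d t => d.modify (t.2.2 - t.2.1) 0 (· + 1)) PySem.Dict.empty
      = PySem.Dict.counter (ms.map fun t => t.2.2 - t.2.1) := by
    rw [PySem.Dict.counter_eq_foldl, List.foldl_map]
  rw [hctr, PySem.Dict.items_counter, pv_max, PySem.List.dedup_eq_ofList]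
  set xs := ms.map (fun t : Int × Int × Int => t.2.2 - t.2.1) with hxs
  have hxne : xs ≠ [] := by simpa [hxs] using hne
  cases hS : PySem.Set.ofList xs with
  | nil =>
      obtain ⟨x, hx⟩ := List.exists_mem_of_ne_nil xs hxne
      have : x ∈ PySem.Set.ofList xs := (PySem.Set.mem_ofList xs x).mpr hx
      rw [hS] at this
      simp at this
  | cons k0 rest =>
      have hk0 : k0 ∈ xs := by
        have : k0 ∈ PySem.Set.ofList xs := by rw [hS]; exact List.mem_cons_self
        exact (PySem.Set.mem_ofList xs k0).mp this
      have hc0 : (0 : Int) ≤ (xs.count k0 : Int) := Int.natCast_nonneg _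
      have hmm : ((k0 :: rest).map (fun k => (k, (xs.count k : Int)))).map (fun x => x.2)
          = (k0 :: rest).map (fun k => (xs.count k : Int)) := by
        simp
      rw [hmm, List.map_cons, PySem.List.max?_id_cons]
      simp only [Option.getD_some]
      have hstep : (fun (b s : Int) => if s > b then s else b) = fun b s => max b s := by
        funext b s
        rcases le_or_gt s b with h | h
        · rw [if_neg (by omega), max_eq_left h]
        · rw [if_pos h, max_eq_right h.le]
      rw [hstep, List.foldl_cons, max_eq_right hc0]

-- A's selection loop, projected past the unused puntuaciones dict, scores each song with pvAv
lemma pvA_phase2 (l : List (String × List (Int × Int × Int))) (a : Int × String)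
    (pd : PySem.Dict String (Int × Int)) :
    (l.foldl
      (fun (st : (Int × String) × PySem.Dict String (Int × Int)) kv =>
        let ppo : PySem.Dict Int Int :=
          kv.2.foldl (fun d t => d.modify (t.2.2 - t.2.1) 0 (· + 1)) PySem.Dict.empty
        let mx : Int × Int := ppo.items.foldl (fun mx os => if os.2 > mx.2 then os else mx) (0, 0)
        let punts := st.2.insert kv.1 mx
        if st.1.1 < mx.2 then ((mx.2, kv.1), punts) else (st.1, punts))
      (a, pd)).1
    = l.foldl (fun (st : Int × String) kv =>
        if st.1 < pvAv kv.2 then (pvAv kv.2, kv.1) else st) a := by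
  induction l generalizing a pd with
  | nil => rfl
  | cons kv t ih =>
      rw [List.foldl_cons, List.foldl_cons]
      have hstep : ∀ st : (Int × String) × PySem.Dict String (Int × Int),
          (t.foldl
            (fun (st : (Int × String) × PySem.Dict String (Int × Int)) kv =>
              let ppo : PySem.Dict Int Int :=
                kv.2.foldl (fun d t => d.modify (t.2.2 - t.2.1) 0 (· + 1)) PySem.Dict.empty
              let mx : Int × Int := ppo.items.foldl (fun mx os => if os.2 > mx.2 then os else mx) (0, 0)
              let punts := st.2.insert kv.1 mx
              if st.1.1 < mx.2 then ((mx.2, kv.1), punts) else (st.1, punts))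
            st).1
          = t.foldl (fun (st : Int × String) kv =>
              if st.1 < pvAv kv.2 then (pvAv kv.2, kv.1) else st) st.1 :=
        fun st => ih st.1 st.2
      rw [hstep]
      congr 1
      show (if a.1 < pvAv kv.2 then ((pvAv kv.2, kv.1),
              pd.insert kv.1 ((kv.2.foldl (fun d t => d.modify (t.2.2 - t.2.1) 0 (· + 1))
                PySem.Dict.empty).items.foldl (fun mx os => if os.2 > mx.2 then os else mx) (0, 0)))
            else (a, pd.insert kv.1 _)).1
          = if a.1 < pvAv kv.2 then (pvAv kv.2, kv.1) else a
      by_cases h : a.1 < pvAv kv.2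
      · rw [if_pos h, if_pos h]
      · rw [if_neg h, if_neg h]

-- per song: A's counter+argmax score on its grouped matches equals B's dedup+count score
lemma pvAB (E : List (String × (Int × Int × Int))) (k : String)
    (hk : k ∈ PySem.Set.ofList (E.map (fun q => q.1))) :
    pvAv ((E.foldl (fun m q => m.modify q.1 [] (fun l => l ++ [q.2])) PySem.Dict.empty).getD k [])
    = pvBv ((List.filter (fun q => q.1 == k)
        (E.map (fun q => (q.1, q.2.2.2 - q.2.2.1)))).map (fun q => q.2)) := by
  have hkE : k ∈ E.map (fun q => q.1) := (PySem.Set.mem_ofList _ _).mp hk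
  obtain ⟨q, hq, hq1⟩ := List.mem_map.mp hkE
  have hgetD : (E.foldl (fun m q => m.modify q.1 [] (fun l => l ++ [q.2]))
      PySem.Dict.empty).getD k [] = (E.filter (fun q => q.1 == k)).map (fun q => q.2) := by
    rw [PySem.Dict.getD_foldl_modify_append]; simp
  have hne : (E.filter (fun q => q.1 == k)) ≠ [] := by
    intro h0
    have hmem : q ∈ E.filter (fun q => q.1 == k) := List.mem_filter.mpr ⟨hq, by simp [hq1]⟩
    rw [h0] at hmem; simp at hmem
  rw [hgetD, pvAv_eq_pvBv _ (by simpa using hne)]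
  congr 1
  rw [List.filter_map, List.map_map, List.map_map]
  rfl

-- B's final phase (dict of per-song scores, global max, first-argmax) in closed form
lemma pvB_side (ss : List String) (hnd : ss.Nodup) (vB : String → Int) :
    (if (PySem.List.max? (ss.foldl (fun d s => d.insert s (vB s))
          (PySem.Dict.empty : PySem.Dict String Int)).values (fun y => y)).getD 0 ≤ 300
     then "NOT_FOUND"
     else (ss.find? (fun s => (ss.foldl (fun d s => d.insert s (vB s))
            (PySem.Dict.empty : PySem.Dict String Int)).getD s 0
            == (PySem.List.max? (ss.foldl (fun d s => d.insert s (vB s))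
                (PySem.Dict.empty : PySem.Dict String Int)).values (fun y => y)).getD 0)).getD
          "NOT_FOUND")
    = if pvM vB ss 300 ≤ 300 then "NOT_FOUND"
      else (ss.find? (fun s => vB s == pvM vB ss 300)).getD "NOT_FOUND" := by
  have hfresh : ∀ a ∈ ss, (PySem.Dict.empty : PySem.Dict String Int).contains a = false :=
    fun a _ => by simp
  have hitems : (ss.foldl (fun d s => d.insert s (vB s))
      (PySem.Dict.empty : PySem.Dict String Int)).items = ss.map (fun s => (s, vB s)) := by
    have h := PySem.Dict.items_foldl_insert_fresh ss (fun s => s) vB PySem.Dict.empty hfresh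
      (by simpa using hnd)
    simpa using h
  have hknd : (ss.foldl (fun d s => d.insert s (vB s))
      (PySem.Dict.empty : PySem.Dict String Int)).keys.Nodup := by
    simp only [PySem.Dict.keys, hitems, List.map_map]
    have h2 : ((fun x : String × Int => x.1) ∘ fun s => (s, vB s)) = id := rfl
    rw [h2, List.map_id]
    exact hnd
  have hvals : (ss.foldl (fun d s => d.insert s (vB s))
      (PySem.Dict.empty : PySem.Dict String Int)).values = ss.map vB := by
    simp only [PySem.Dict.values, hitems, List.map_map]
    rfl
  have hget : ∀ s ∈ ss, (ss.foldl (fun d s => d.insert s (vB s))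
      (PySem.Dict.empty : PySem.Dict String Int)).getD s 0 = vB s := by
    intro s hs
    exact PySem.Dict.getD_of_mem_items _ (by rw [hitems]; exact List.mem_map_of_mem hs) hknd 0
  rw [hvals]
  cases ss with
  | nil => simp [pvM_nil]
  | cons s0 t =>
      rw [List.map_cons, PySem.List.max?_id_cons]
      simp only [Option.getD_some]
      have hm : (t.map vB).foldl max (vB s0) = pvM vB t (vB s0) := by
        rw [List.foldl_map]; rfl
      rw [hm]
      have hM : pvM vB (s0 :: t) 300 = max 300 (pvM vB t (vB s0)) := by
        rw [pvM_cons, pvM_max_comm]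
      rw [hM]
      by_cases hc : pvM vB t (vB s0) ≤ 300
      · rw [if_pos hc, if_pos (by omega)]
      · rw [if_neg hc, if_neg (by omega)]
        have hMeq : max 300 (pvM vB t (vB s0)) = pvM vB t (vB s0) := by omega
        rw [hMeq]
        congr 1
        exact pv_find_congr _ (fun x hx => by rw [hget x hx])

-- ===== VERDICT (by name: the statement is the Claim_ definition above) =====
theorem comparar2_spec : Claim_equal_comparar2 := by
  intro hashes database _
  unfold Spec_comparar2 comparar2 comparar2_alt
  dsimp only
  rw [pvA_group hashes database, pvB_pairs hashes database]
  -- names for the shared data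
  have hkeys : ((pvE hashes database).foldl
      (fun m q => m.modify q.1 [] (fun l => l ++ [q.2]))
      (PySem.Dict.empty : PySem.Dict String (List (Int × Int × Int)))).keys
      = PySem.Set.ofList ((pvE hashes database).map (fun q => q.1)) := by
    rw [PySem.Dict.keys_foldl_modify_key]
    simp [PySem.Set.update_nil_left]
  have hnd : ((pvE hashes database).foldl
      (fun m q => m.modify q.1 [] (fun l => l ++ [q.2]))
      (PySem.Dict.empty : PySem.Dict String (List (Int × Int × Int)))).keys.Nodup := by
    rw [hkeys]; exact PySem.Set.nodup_ofList _
  have hgetD : ∀ k, ((pvE hashes database).foldl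
      (fun m q => m.modify q.1 [] (fun l => l ++ [q.2]))
      (PySem.Dict.empty : PySem.Dict String (List (Int × Int × Int)))).getD k []
      = ((pvE hashes database).filter (fun q => q.1 == k)).map (fun q => q.2) := by
    intro k
    rw [PySem.Dict.getD_foldl_modify_append]
    simp
  rw [pvA_phase2]
  rw [PySem.Dict.items_eq_map_keys _ hnd ([] : List (Int × Int × Int)), hkeys]
  rw [List.foldl_map]
  dsimp only
  rw [pvSel]
  dsimp only
  clear hkeys hnd hgetD
  generalize pvE hashes database = E
  have hsongs : PySem.List.dedup ((E.map (fun q => (q.1, q.2.2.2 - q.2.2.1))).map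
      (fun q => q.1)) = PySem.Set.ofList (E.map (fun q => q.1)) := by
    rw [PySem.List.dedup_eq_ofList, List.map_map]
    rfl
  rw [hsongs]
  rw [pvB_side (PySem.Set.ofList (E.map (fun q => q.1))) (PySem.Set.nodup_ofList _)
    (fun s => (PySem.List.max? ((PySem.List.dedup ((List.filter (fun q => q.1 == s)
      (E.map (fun q => (q.1, q.2.2.2 - q.2.2.1)))).map (fun q => q.2))).map
      (fun dl => (((List.filter (fun q => q.1 == s)
        (E.map (fun q => (q.1, q.2.2.2 - q.2.2.1)))).map (fun q => q.2)).count dl : Int)))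
      (fun y => y)).getD 0)]
  have hMv : pvM (fun y => pvAv ((E.foldl (fun m q => m.modify q.1 [] fun l => l ++ [q.2])
        PySem.Dict.empty).getD y [])) (PySem.Set.ofList (E.map (fun q => q.1))) 300
      = pvM (fun s => (PySem.List.max? ((PySem.List.dedup ((List.filter (fun q => q.1 == s)
          (E.map (fun q => (q.1, q.2.2.2 - q.2.2.1)))).map (fun q => q.2))).map
          (fun dl => (((List.filter (fun q => q.1 == s)
            (E.map (fun q => (q.1, q.2.2.2 - q.2.2.1)))).map (fun q => q.2)).count dl : Int)))
          (fun y => y)).getD 0) (PySem.Set.ofList (E.map (fun q => q.1))) 300 := by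
    refine PySem.List.foldl_congr_mem _ _ _ 300 (fun acc x hx => ?_)
    beta_reduce
    rw [pvAB E x hx]
    rfl
  rw [hMv]
  by_cases hc : pvM (fun s => (PySem.List.max? ((PySem.List.dedup ((List.filter (fun q => q.1 == s)
      (E.map (fun q => (q.1, q.2.2.2 - q.2.2.1)))).map (fun q => q.2))).map
      (fun dl => (((List.filter (fun q => q.1 == s)
        (E.map (fun q => (q.1, q.2.2.2 - q.2.2.1)))).map (fun q => q.2)).count dl : Int)))
      (fun y => y)).getD 0) (PySem.Set.ofList (E.map (fun q => q.1))) 300 ≤ 300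
  · rw [if_pos hc, if_pos hc]
  · rw [if_neg hc, if_neg hc]
    congr 1
    refine pv_find_congr _ (fun x hx => ?_)
    beta_reduce
    rw [pvAB E x hx]
    rfl
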